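-- pv_equiv track=rewrite | github.com/to-sora/AI_templane | project/models/detr_audio.py | _calculate_skip_points
-- ===== SOURCE A (Python) =====
-- def _calculate_skip_points(num_layers, use_skip):
--     """
--     Calculate the layer indices after which to add residual connections.
--     Distribute skips as evenly as possible across the layers.
--
--     Returns a list of layer indices.
--     """
--     skip_points = []
--     total_segments = use_skip + 1
--     layers_per_segment = num_layers // total_segments
--     remainder = num_layers % total_segments
--
--     current = 0
--     for i in range(use_skip):
--         # Distribute the remainder across the first few segments
--         increment = layers_per_segment + (1 if i < remainder else 0)
--         current += increment
--         skip_points.append(current * 2 - 1)  # Each Linear and ReLU is a pair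
--     return skip_points
-- ===== SOURCE B (Python) =====
-- def _calculate_skip_points(num_layers, use_skip):
--     """Closed-form version: each skip point computed directly, no running accumulator."""
--     total_segments = use_skip + 1
--     layers_per_segment = num_layers // total_segments
--     remainder = num_layers % total_segments
--     return [((i + 1) * layers_per_segment + min(i + 1, remainder)) * 2 - 1
--             for i in range(use_skip)]
-- ===== Notes on version B (the rewrite author's own statement) =====
-- stated objective: simpler
-- what changed: Replaces the loop that threads a mutable running accumulator `current` with a list comprehension computing each skip point by the closed form (i+1)*layers_per_segment + min(i+1, remainder).
import Mathlib
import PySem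

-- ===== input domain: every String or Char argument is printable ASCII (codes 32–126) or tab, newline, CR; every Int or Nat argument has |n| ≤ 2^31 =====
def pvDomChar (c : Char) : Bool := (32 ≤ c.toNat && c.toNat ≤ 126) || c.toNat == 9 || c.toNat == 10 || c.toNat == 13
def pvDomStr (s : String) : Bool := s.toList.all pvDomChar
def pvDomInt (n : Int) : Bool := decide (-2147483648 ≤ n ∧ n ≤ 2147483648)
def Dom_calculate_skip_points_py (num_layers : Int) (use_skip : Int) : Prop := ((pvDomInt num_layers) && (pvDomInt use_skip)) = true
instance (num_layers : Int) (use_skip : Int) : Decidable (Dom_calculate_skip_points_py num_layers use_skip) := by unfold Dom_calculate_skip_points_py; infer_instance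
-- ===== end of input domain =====

-- B replaces A's running accumulator `current` with a per-index closed form; objective: simpler.

-- ===== PORT A =====
def calculate_skip_points_py (num_layers : Int) (use_skip : Int) : List Int :=
  let total_segments := use_skip + 1
  let layers_per_segment := PySem.Int.floordiv num_layers total_segments
  let remainder := PySem.Int.mod num_layers total_segments
  let st := (PySem.List.pyRange 0 use_skip 1).foldl
    (fun (st : Int × List Int) i =>
      let increment := layers_per_segment + (if i < remainder then 1 else 0)
      let current := st.1 + increment
      (current, st.2 ++ [current * 2 - 1]))
    (0, [])
  st.2

-- ===== PORT B =====
def calculate_skip_points_py_alt (num_layers : Int) (use_skip : Int) : List Int :=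
  let total_segments := use_skip + 1
  let layers_per_segment := PySem.Int.floordiv num_layers total_segments
  let remainder := PySem.Int.mod num_layers total_segments
  (PySem.List.pyRange 0 use_skip 1).map
    (fun i => ((i + 1) * layers_per_segment + min (i + 1) remainder) * 2 - 1)

-- ===== PRECONDITION & SPEC =====
-- Pre_ excludes exactly use_skip = -1, where total_segments = 0 and A raises ZeroDivisionError.
def Pre_calculate_skip_points_py (num_layers : Int) (use_skip : Int) : Prop := use_skip ≠ -1
instance (num_layers : Int) (use_skip : Int) : Decidable (Pre_calculate_skip_points_py num_layers use_skip) := by unfold Pre_calculate_skip_points_py; infer_instance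
def pvWitness_calculate_skip_points_py : Int × Int := (10, 3)

def Spec_calculate_skip_points_py (num_layers : Int) (use_skip : Int) (out : List Int) : Prop := out = calculate_skip_points_py_alt num_layers use_skip
instance (num_layers : Int) (use_skip : Int) (out : List Int) : Decidable (Spec_calculate_skip_points_py num_layers use_skip out) := by unfold Spec_calculate_skip_points_py; infer_instance

-- ===== CLAIM (what is proved, stated in full; the proofs are below) =====
def Claim_equal_calculate_skip_points_py : Prop := ∀ (num_layers : Int) (use_skip : Int), Dom_calculate_skip_points_py num_layers use_skip → Pre_calculate_skip_points_py num_layers use_skip → Spec_calculate_skip_points_py num_layers use_skip (calculate_skip_points_py num_layers use_skip)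

-- ===== LEMMAS AND PROOFS =====

-- Loop invariant: after n iterations, A's accumulator equals the closed form
-- n*lps + min n rem, and the emitted list is the per-index closed form.
theorem pv_loop_closed (lps rem : Int) (hrem : 0 ≤ rem) (n : Nat) :
    (List.range n).foldl
      (fun (st : Int × List Int) (k : Nat) =>
        (st.1 + (lps + if (k : Int) < rem then 1 else 0),
         st.2 ++ [(st.1 + (lps + if (k : Int) < rem then 1 else 0)) * 2 - 1]))
      (0, [])
    = ((n : Int) * lps + min (n : Int) rem,
       (List.range n).map
         (fun (k : Nat) => (((k : Int) + 1) * lps + min ((k : Int) + 1) rem) * 2 - 1)) := by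
  induction n with
  | zero => simp [hrem]
  | succ m ih =>
      rw [List.range_succ, List.foldl_append, List.map_append, ih]
      simp only [List.foldl_cons, List.foldl_nil, List.map_cons, List.map_nil, Prod.mk.injEq]
      constructor
      · push_cast
        rw [add_one_mul]
        split_ifs with h <;> omega
      · congr 1
        rw [show ((m : Int) * lps + min (m : Int) rem + (lps + if (m : Int) < rem then 1 else 0))
            = ((m : Int) + 1) * lps + min ((m : Int) + 1) rem by
          rw [add_one_mul]; split_ifs with h <;> omega]

-- ===== VERDICT (by name: the statement is the Claim_ definition above) =====
theorem calculate_skip_points_py_spec : Claim_equal_calculate_skip_points_py := by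
  intro num_layers use_skip _ hpre
  unfold Spec_calculate_skip_points_py calculate_skip_points_py calculate_skip_points_py_alt
  rw [PySem.List.pyRange_one]
  by_cases hs : use_skip ≤ 0
  · have h0 : use_skip.toNat = 0 := by omega
    simp [h0]
  · have hrem : 0 ≤ PySem.Int.mod num_layers (use_skip + 1) :=
      PySem.Int.mod_nonneg _ (by omega)
    simp only [List.foldl_map, List.map_map, Int.sub_zero, zero_add]
    rw [pv_loop_closed _ _ hrem]
    simp
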